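-- pv_equiv track=rewrite | github.com/sakshipagaria/Python | guessmovie.py | create_question
-- ===== SOURCE A (Python) =====
-- def create_question(movie):
--     n=len(movie)
--     letters=list(movie)
--     temp=[]
--     for i in range(n):
--         if letters[i]=='':
--             temp.append('')
--         else:
--             temp.append('*')
--     qn=''.join(str(x) for x in temp)
--     return qn
-- ===== SOURCE B (Python) =====
-- def create_question(movie):
--     return '*' * len(movie)
-- ===== Notes on version B (the rewrite author's own statement) =====
-- stated objective: simpler
-- what changed: replaces the per-character loop, dead empty-string branch, list accumulation and join with the closed form '*' * len(movie)
import Mathlib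
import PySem

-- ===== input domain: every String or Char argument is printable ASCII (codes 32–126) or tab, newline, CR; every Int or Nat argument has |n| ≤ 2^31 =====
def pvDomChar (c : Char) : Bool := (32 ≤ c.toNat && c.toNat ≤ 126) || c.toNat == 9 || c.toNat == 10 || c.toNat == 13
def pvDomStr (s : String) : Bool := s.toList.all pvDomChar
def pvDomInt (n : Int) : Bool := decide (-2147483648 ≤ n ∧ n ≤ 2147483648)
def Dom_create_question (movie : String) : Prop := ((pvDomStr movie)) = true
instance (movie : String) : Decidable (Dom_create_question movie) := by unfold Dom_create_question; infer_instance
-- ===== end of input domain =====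

-- B replaces A's per-character loop (with its dead empty-string branch), list accumulation and join
-- by the closed form '*' * len(movie); equivalent on all inputs.

-- ===== PORT A =====
-- letters = list(movie): each element is a one-character string
def create_question (movie : String) : String :=
  let n : Nat := movie.toList.length
  let letters : List String := movie.toList.map (fun c => String.ofList [c])
  let temp : List String :=
    (PySem.List.pyRange 0 (n : Int) 1).foldl (fun acc i =>
      acc ++ [if PySem.List.pyGetD letters i "" == "" then "" else "*"]) []
  PySem.Str.join "" temp

-- ===== PORT B =====
def create_question_alt (movie : String) : String :=
  String.ofList (PySem.List.pyRepeat ['*'] (movie.toList.length : Int))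

-- ===== PRECONDITION & SPEC =====
def Spec_create_question (movie : String) (out : String) : Prop := out = create_question_alt movie
instance (movie : String) (out : String) : Decidable (Spec_create_question movie out) := by unfold Spec_create_question; infer_instance

-- ===== CLAIM (what is proved, stated in full; the proofs are below) =====
def Claim_equal_create_question : Prop := ∀ (movie : String), Dom_create_question movie → Spec_create_question movie (create_question movie)

-- ===== LEMMAS AND PROOFS =====

-- A's temp is a list of n copies of "*": the '' branch is dead, each letter is one character long
theorem create_question_temp (cs : List Char) :
    ((PySem.List.pyRange 0 (cs.length : Int) 1).foldl (fun acc i =>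
      acc ++ [if PySem.List.pyGetD (cs.map (fun c => String.ofList [c])) i "" == "" then "" else "*"]) [])
    = List.replicate cs.length "*" := by
  rw [PySem.List.foldl_append_singleton_eq_map]
  rw [List.nil_append]
  have hlen : (PySem.List.pyRange 0 (cs.length : Int) 1).length = cs.length := by
    simp [PySem.List.length_pyRange_one]
  rw [show (List.replicate cs.length ("*":String)) = List.replicate (PySem.List.pyRange 0 (cs.length : Int) 1).length "*" from by rw [hlen], ← List.map_const']
  apply List.map_congr_left
  intro i hi
  have hmem := (PySem.List.mem_pyRange_one).1 hi
  rw [PySem.List.pyGetD_eq_getElem _ _ hmem.1 (by simpa using hmem.2)]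
  have : (cs.map (fun c => String.ofList [c]))[i.toNat]'(by simpa using (by omega : i.toNat < cs.length)) =
      String.ofList [cs[i.toNat]'(by omega)] := by
    simp
  rw [this]
  rw [if_neg]
  intro hc
  have hc' := congrArg String.toList (eq_of_beq hc)
  rw [String.toList_ofList] at hc'
  simp at hc'

theorem create_question_spec' (movie : String) :
    create_question movie = create_question_alt movie := by
  unfold create_question create_question_alt
  dsimp only
  rw [create_question_temp movie.toList]
  rw [PySem.List.pyRepeat_singleton]
  apply String.toList_inj.mp
  rw [String.toList_ofList, PySem.Str.toList_join]
  have h1 : (List.replicate movie.toList.length ("*":String)).map String.toList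
      = (List.replicate movie.toList.length '*').map ([·]) := by
    simp [List.map_replicate]
  rw [h1, String.toList_empty, PySem.Chars.join_nil_singletons]
  simp

-- ===== VERDICT (by name: the statement is the Claim_ definition above) =====
theorem create_question_spec : Claim_equal_create_question := by
  intro movie _
  exact create_question_spec' movie
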